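-- pv_equiv track=rewrite | github.com/dwalton76/rubiks-cube-lookup-tables | utils/print-moves.py | ULFRBD_preserved
-- ===== SOURCE A (Python) =====
-- def ULFRBD_preserved(steps):
--     """
--     When we are setting up to slice forward all of the centers are intact so we do
--     not have to worry about damaging them.  For slicing back though the LFRB centers
--     will look like:
--
--     Return True if steps leaves the centers intact
--     """
--     state_U = 0
--     state_L = 0
--     state_F = 0
--     state_R = 0
--     state_B = 0
--     state_D = 0
--
--     for step in steps:
--
--         if step == "U":
--             state_U += 1
--         elif step == "U'":
--             state_U -= 1
--         elif step == "U2":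
--             state_U += 2
--
--         elif step == "L":
--             state_L += 1
--         elif step == "L'":
--             state_L -= 1
--         elif step == "L2":
--             state_L += 2
--
--         elif step == "F":
--             state_F += 1
--         elif step == "F'":
--             state_F -= 1
--         elif step == "F2":
--             state_F += 2
--
--         elif step == "R":
--             state_R += 1
--         elif step == "R'":
--             state_R -= 1
--         elif step == "R2":
--             state_R += 2
--
--         elif step == "B":
--             state_B += 1
--         elif step == "B'":
--             state_B -= 1
--         elif step == "B2":
--             state_B += 2
--
--         elif step == "D":
--             state_D += 1
--         elif step == "D'":
--             state_D -= 1
--         elif step == "D2":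
--             state_D += 2
--
--         else:
--             raise Exception("Invalid step %s" % step)
--
--     #steps_str = ' '.join(steps)
--     #log.info("steps %s, state_L %d, state_F %d, state_R %d, state_B %d" % (steps_str, state_L, state_F, state_R, state_B))
--
--     if (state_U == 0 and state_L == 0 and state_F == 0 and state_R == 0 and state_B == 0 and state_D == 0):
--         return True
--
--     if (state_U % 4 == 0 and state_L % 4 == 0 and state_F % 4 == 0 and state_R % 4 == 0 and state_B % 4 == 0 and state_D % 4 == 0):
--         return True
--
--     return False
-- ===== SOURCE B (Python) =====
-- def ULFRBD_preserved(steps):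
--     deltas = {"": 1, "'": -1, "2": 2}
--     for step in steps:
--         if step[:1] not in ("U", "L", "F", "R", "B", "D") or step[1:] not in deltas:
--             raise Exception("Invalid step %s" % step)
--     return all(sum(deltas[s[1:]] for s in steps if s[:1] == f) % 4 == 0 for f in "ULFRBD")
-- ===== Notes on version B (the rewrite author's own statement) =====
-- stated objective: simpler
-- what changed: Replaced the 18-branch if/elif ladder over six named counters by parsing each step into face and suffix, summing the suffix deltas per face, and checking every per-face sum mod 4 (the redundant all-zero check disappears).
import Mathlib
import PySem

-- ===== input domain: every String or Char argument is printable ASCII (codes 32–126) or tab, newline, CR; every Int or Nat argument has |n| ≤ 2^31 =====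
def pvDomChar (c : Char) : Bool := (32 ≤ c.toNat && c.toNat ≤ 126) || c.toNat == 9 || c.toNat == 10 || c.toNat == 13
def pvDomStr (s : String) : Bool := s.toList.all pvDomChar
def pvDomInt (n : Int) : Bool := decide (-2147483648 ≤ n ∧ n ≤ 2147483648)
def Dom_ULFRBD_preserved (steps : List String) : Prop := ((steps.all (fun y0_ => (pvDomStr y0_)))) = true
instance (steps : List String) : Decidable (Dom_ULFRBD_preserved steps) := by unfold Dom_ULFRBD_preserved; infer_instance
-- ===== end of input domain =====

-- B replaces A's 18-branch if/elif ladder by parsing each step into face + suffix and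
-- summing suffix deltas per face (objective: simpler). Equivalence is about the return value.

-- ===== PORT A =====
-- one iteration of A's loop; none = the raised Exception("Invalid step %s" % step)
def pvStepA (st : Option (Int × Int × Int × Int × Int × Int)) (step : String) :
    Option (Int × Int × Int × Int × Int × Int) :=
  match st with
  | none => none
  | some (u, l, f, r, b, d) =>
    if step = "U" then some (u + 1, l, f, r, b, d)
    else if step = "U'" then some (u - 1, l, f, r, b, d)
    else if step = "U2" then some (u + 2, l, f, r, b, d)
    else if step = "L" then some (u, l + 1, f, r, b, d)
    else if step = "L'" then some (u, l - 1, f, r, b, d)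
    else if step = "L2" then some (u, l + 2, f, r, b, d)
    else if step = "F" then some (u, l, f + 1, r, b, d)
    else if step = "F'" then some (u, l, f - 1, r, b, d)
    else if step = "F2" then some (u, l, f + 2, r, b, d)
    else if step = "R" then some (u, l, f, r + 1, b, d)
    else if step = "R'" then some (u, l, f, r - 1, b, d)
    else if step = "R2" then some (u, l, f, r + 2, b, d)
    else if step = "B" then some (u, l, f, r, b + 1, d)
    else if step = "B'" then some (u, l, f, r, b - 1, d)
    else if step = "B2" then some (u, l, f, r, b + 2, d)
    else if step = "D" then some (u, l, f, r, b, d + 1)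
    else if step = "D'" then some (u, l, f, r, b, d - 1)
    else if step = "D2" then some (u, l, f, r, b, d + 2)
    else none

def ULFRBD_preserved (steps : List String) : Bool :=
  match steps.foldl pvStepA (some (0, 0, 0, 0, 0, 0)) with
  | none => false   -- A raises here; excluded by Pre_
  | some (u, l, f, r, b, d) =>
    if u = 0 ∧ l = 0 ∧ f = 0 ∧ r = 0 ∧ b = 0 ∧ d = 0 then true
    else if PySem.Int.mod u 4 = 0 ∧ PySem.Int.mod l 4 = 0 ∧ PySem.Int.mod f 4 = 0 ∧
            PySem.Int.mod r 4 = 0 ∧ PySem.Int.mod b 4 = 0 ∧ PySem.Int.mod d 4 = 0 then true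
    else false

-- ===== PORT B =====
def pvDeltas : PySem.Dict String Int := PySem.Dict.ofList [("", 1), ("'", -1), ("2", 2)]

def pvFace (s : String) : String := PySem.Str.slice s none (some 1)      -- step[:1]
def pvSuffix (s : String) : String := PySem.Str.slice s (some 1) none    -- step[1:]

def pvValidStep (s : String) : Bool :=
  decide (pvFace s ∈ (["U", "L", "F", "R", "B", "D"] : List String)) && pvDeltas.contains (pvSuffix s)

-- sum(deltas[s[1:]] for s in steps if s[:1] == f)
def pvFaceSum (f : String) (steps : List String) : Int :=
  ((steps.filter (fun s => pvFace s == f)).map (fun s => pvDeltas.getD (pvSuffix s) 0)).sum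

def ULFRBD_preserved_alt (steps : List String) : Bool :=
  if steps.all pvValidStep then
    (["U", "L", "F", "R", "B", "D"] : List String).all
      (fun f => PySem.Int.mod (pvFaceSum f steps) 4 == 0)
  else false   -- B raises here; excluded by Pre_

-- ===== PRECONDITION & SPEC =====
def pvValid18 : List String :=
  ["U", "U'", "U2", "L", "L'", "L2", "F", "F'", "F2",
   "R", "R'", "R2", "B", "B'", "B2", "D", "D'", "D2"]

-- exactly the inputs on which the Python A returns (any other step makes A raise)
def Pre_ULFRBD_preserved (steps : List String) : Prop := ∀ s ∈ steps, s ∈ pvValid18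
instance (steps : List String) : Decidable (Pre_ULFRBD_preserved steps) := by
  unfold Pre_ULFRBD_preserved; infer_instance

def pvWitness_ULFRBD_preserved : List String := ["U", "R'", "F2", "U"]

def Spec_ULFRBD_preserved (steps : List String) (out : Bool) : Prop := out = ULFRBD_preserved_alt steps
instance (steps : List String) (out : Bool) : Decidable (Spec_ULFRBD_preserved steps out) := by
  unfold Spec_ULFRBD_preserved; infer_instance

-- ===== CLAIM (what is proved, stated in full; the proofs are below) =====
def Claim_equal_ULFRBD_preserved : Prop := ∀ (steps : List String), Dom_ULFRBD_preserved steps → Pre_ULFRBD_preserved steps → Spec_ULFRBD_preserved steps (ULFRBD_preserved steps)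

-- ===== LEMMAS AND PROOFS =====
-- the per-face contribution of one step
def pvDlt (f s : String) : Int := if pvFace s == f then pvDeltas.getD (pvSuffix s) 0 else 0

theorem pvFaceSum_nil (f : String) : pvFaceSum f [] = 0 := rfl

theorem pvFaceSum_cons (f s : String) (ss : List String) :
    pvFaceSum f (s :: ss) = pvDlt f s + pvFaceSum f ss := by
  simp only [pvFaceSum, pvDlt, List.filter_cons]
  by_cases h : pvFace s == f
  · simp [h]
  · simp [h]

theorem pvStepA_valid (s : String) (hs : s ∈ pvValid18) (u l f r b d : Int) :
    pvStepA (some (u, l, f, r, b, d)) s =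
      some (u + pvDlt "U" s, l + pvDlt "L" s, f + pvDlt "F" s,
            r + pvDlt "R" s, b + pvDlt "B" s, d + pvDlt "D" s) := by
  fin_cases hs
  · simp [pvStepA, show pvDlt "U" "U" = 1 from by decide, show pvDlt "L" "U" = 0 from by decide, show pvDlt "F" "U" = 0 from by decide, show pvDlt "R" "U" = 0 from by decide, show pvDlt "B" "U" = 0 from by decide, show pvDlt "D" "U" = 0 from by decide]
    try omega
  · simp [pvStepA, show pvDlt "U" "U'" = -1 from by decide, show pvDlt "L" "U'" = 0 from by decide, show pvDlt "F" "U'" = 0 from by decide, show pvDlt "R" "U'" = 0 from by decide, show pvDlt "B" "U'" = 0 from by decide, show pvDlt "D" "U'" = 0 from by decide]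
    try omega
  · simp [pvStepA, show pvDlt "U" "U2" = 2 from by decide, show pvDlt "L" "U2" = 0 from by decide, show pvDlt "F" "U2" = 0 from by decide, show pvDlt "R" "U2" = 0 from by decide, show pvDlt "B" "U2" = 0 from by decide, show pvDlt "D" "U2" = 0 from by decide]
    try omega
  · simp [pvStepA, show pvDlt "U" "L" = 0 from by decide, show pvDlt "L" "L" = 1 from by decide, show pvDlt "F" "L" = 0 from by decide, show pvDlt "R" "L" = 0 from by decide, show pvDlt "B" "L" = 0 from by decide, show pvDlt "D" "L" = 0 from by decide]
    try omega
  · simp [pvStepA, show pvDlt "U" "L'" = 0 from by decide, show pvDlt "L" "L'" = -1 from by decide, show pvDlt "F" "L'" = 0 from by decide, show pvDlt "R" "L'" = 0 from by decide, show pvDlt "B" "L'" = 0 from by decide, show pvDlt "D" "L'" = 0 from by decide]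
    try omega
  · simp [pvStepA, show pvDlt "U" "L2" = 0 from by decide, show pvDlt "L" "L2" = 2 from by decide, show pvDlt "F" "L2" = 0 from by decide, show pvDlt "R" "L2" = 0 from by decide, show pvDlt "B" "L2" = 0 from by decide, show pvDlt "D" "L2" = 0 from by decide]
    try omega
  · simp [pvStepA, show pvDlt "U" "F" = 0 from by decide, show pvDlt "L" "F" = 0 from by decide, show pvDlt "F" "F" = 1 from by decide, show pvDlt "R" "F" = 0 from by decide, show pvDlt "B" "F" = 0 from by decide, show pvDlt "D" "F" = 0 from by decide]
    try omega
  · simp [pvStepA, show pvDlt "U" "F'" = 0 from by decide, show pvDlt "L" "F'" = 0 from by decide, show pvDlt "F" "F'" = -1 from by decide, show pvDlt "R" "F'" = 0 from by decide, show pvDlt "B" "F'" = 0 from by decide, show pvDlt "D" "F'" = 0 from by decide]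
    try omega
  · simp [pvStepA, show pvDlt "U" "F2" = 0 from by decide, show pvDlt "L" "F2" = 0 from by decide, show pvDlt "F" "F2" = 2 from by decide, show pvDlt "R" "F2" = 0 from by decide, show pvDlt "B" "F2" = 0 from by decide, show pvDlt "D" "F2" = 0 from by decide]
    try omega
  · simp [pvStepA, show pvDlt "U" "R" = 0 from by decide, show pvDlt "L" "R" = 0 from by decide, show pvDlt "F" "R" = 0 from by decide, show pvDlt "R" "R" = 1 from by decide, show pvDlt "B" "R" = 0 from by decide, show pvDlt "D" "R" = 0 from by decide]
    try omega
  · simp [pvStepA, show pvDlt "U" "R'" = 0 from by decide, show pvDlt "L" "R'" = 0 from by decide, show pvDlt "F" "R'" = 0 from by decide, show pvDlt "R" "R'" = -1 from by decide, show pvDlt "B" "R'" = 0 from by decide, show pvDlt "D" "R'" = 0 from by decide]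
    try omega
  · simp [pvStepA, show pvDlt "U" "R2" = 0 from by decide, show pvDlt "L" "R2" = 0 from by decide, show pvDlt "F" "R2" = 0 from by decide, show pvDlt "R" "R2" = 2 from by decide, show pvDlt "B" "R2" = 0 from by decide, show pvDlt "D" "R2" = 0 from by decide]
    try omega
  · simp [pvStepA, show pvDlt "U" "B" = 0 from by decide, show pvDlt "L" "B" = 0 from by decide, show pvDlt "F" "B" = 0 from by decide, show pvDlt "R" "B" = 0 from by decide, show pvDlt "B" "B" = 1 from by decide, show pvDlt "D" "B" = 0 from by decide]
    try omega
  · simp [pvStepA, show pvDlt "U" "B'" = 0 from by decide, show pvDlt "L" "B'" = 0 from by decide, show pvDlt "F" "B'" = 0 from by decide, show pvDlt "R" "B'" = 0 from by decide, show pvDlt "B" "B'" = -1 from by decide, show pvDlt "D" "B'" = 0 from by decide]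
    try omega
  · simp [pvStepA, show pvDlt "U" "B2" = 0 from by decide, show pvDlt "L" "B2" = 0 from by decide, show pvDlt "F" "B2" = 0 from by decide, show pvDlt "R" "B2" = 0 from by decide, show pvDlt "B" "B2" = 2 from by decide, show pvDlt "D" "B2" = 0 from by decide]
    try omega
  · simp [pvStepA, show pvDlt "U" "D" = 0 from by decide, show pvDlt "L" "D" = 0 from by decide, show pvDlt "F" "D" = 0 from by decide, show pvDlt "R" "D" = 0 from by decide, show pvDlt "B" "D" = 0 from by decide, show pvDlt "D" "D" = 1 from by decide]
    try omega
  · simp [pvStepA, show pvDlt "U" "D'" = 0 from by decide, show pvDlt "L" "D'" = 0 from by decide, show pvDlt "F" "D'" = 0 from by decide, show pvDlt "R" "D'" = 0 from by decide, show pvDlt "B" "D'" = 0 from by decide, show pvDlt "D" "D'" = -1 from by decide]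
    try omega
  · simp [pvStepA, show pvDlt "U" "D2" = 0 from by decide, show pvDlt "L" "D2" = 0 from by decide, show pvDlt "F" "D2" = 0 from by decide, show pvDlt "R" "D2" = 0 from by decide, show pvDlt "B" "D2" = 0 from by decide, show pvDlt "D" "D2" = 2 from by decide]
    try omega

theorem pvValidStep_of_mem (s : String) (hs : s ∈ pvValid18) : pvValidStep s = true := by
  fin_cases hs <;> decide

theorem pvFoldA (steps : List String) (h : ∀ s ∈ steps, s ∈ pvValid18) (u l f r b d : Int) :
    steps.foldl pvStepA (some (u, l, f, r, b, d)) =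
      some (u + pvFaceSum "U" steps, l + pvFaceSum "L" steps, f + pvFaceSum "F" steps,
            r + pvFaceSum "R" steps, b + pvFaceSum "B" steps, d + pvFaceSum "D" steps) := by
  induction steps generalizing u l f r b d with
  | nil => simp [pvFaceSum_nil]
  | cons s ss ih =>
    rw [List.foldl_cons, pvStepA_valid s (h s (List.mem_cons_self ..)),
        ih (fun t ht => h t (List.mem_cons_of_mem _ ht))]
    simp only [pvFaceSum_cons, Option.some.injEq, Prod.mk.injEq]
    refine ⟨by ring, by ring, by ring, by ring, by ring, by ring⟩

-- ===== VERDICT (by name: the statement is the Claim_ definition above) =====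
theorem ULFRBD_preserved_spec : Claim_equal_ULFRBD_preserved := by
  intro steps _ hpre
  unfold Spec_ULFRBD_preserved ULFRBD_preserved ULFRBD_preserved_alt
  rw [pvFoldA steps hpre 0 0 0 0 0 0]
  have hall : steps.all pvValidStep = true :=
    List.all_eq_true.mpr (fun s hs => pvValidStep_of_mem s (hpre s hs))
  rw [if_pos hall, Bool.eq_iff_iff]
  simp only [zero_add, List.all_cons, List.all_nil, Bool.and_true, Bool.and_eq_true,
    beq_iff_eq]
  constructor
  · intro hA
    split_ifs at hA with h0 h4
    · obtain ⟨e1, e2, e3, e4, e5, e6⟩ := h0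
      refine ⟨?_, ?_, ?_, ?_, ?_, ?_⟩ <;> simp [e1, e2, e3, e4, e5, e6]
    · exact ⟨h4.1, h4.2.1, h4.2.2.1, h4.2.2.2.1, h4.2.2.2.2.1, h4.2.2.2.2.2⟩
  · intro ⟨h1, h2, h3, h5, h6, h7⟩
    split_ifs with h0 h4
    · rfl
    · rfl
    · exact absurd ⟨h1, h2, h3, h5, h6, h7⟩ h4
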